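-- pv_equiv track=rewrite | github.com/tabish3210/unstop_problems_DSA | Total cost of fuse bulb in the graph.py | total_non_functional_cost
-- ===== SOURCE A (Python) =====
-- from collections import deque, defaultdict
--
-- def total_non_functional_cost(K, N, M, edges):
--     # Handle the case where M = 0
--     if M == 0:
--         return 0
--
--     # Step 1: Create adjacency list
--     graph = defaultdict(list)
--     for u, v in edges:
--         graph[u].append(v)
--         graph[v].append(u)
--
--     # Step 2: BFS traversal from node 0
--     visited = set([0])
--     queue = deque([0])
--     non_functional_count = 0
--
--     while queue:
--         node = queue.popleft()
--         # Step 3: Check non-functional condition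
--         if node != 0 and node % M == 0:
--             non_functional_count += 1
--
--         for neighbor in graph[node]:
--             if neighbor not in visited:
--                 visited.add(neighbor)
--                 queue.append(neighbor)
--
--     # Step 4: Calculate total cost
--     return non_functional_count * K
-- ===== SOURCE B (Python) =====
-- def total_non_functional_cost(K, N, M, edges):
--     # Saturation instead of BFS: grow the component of node 0 by whole
--     # frontier layers until it stops changing, then count divisible nodes.
--     if M == 0:
--         return 0
--     comp = {0}
--     for _ in range(2 * len(edges)):
--         frontier = {w for u, v in edges if u in comp or v in comp
--                     for w in (u, v) if w not in comp}
--         if not frontier: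
--             break
--         comp |= frontier
--     return sum(1 for x in comp if x != 0 and x % M == 0) * K
-- ===== Notes on version B (the rewrite author's own statement) =====
-- stated objective: alternative
-- what changed: Replaces the adjacency-list + BFS queue traversal with whole-frontier set saturation: the component of node 0 is grown one layer per pass directly over the edge list until it stops changing, then divisible members are counted in one final pass.
import Mathlib
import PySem

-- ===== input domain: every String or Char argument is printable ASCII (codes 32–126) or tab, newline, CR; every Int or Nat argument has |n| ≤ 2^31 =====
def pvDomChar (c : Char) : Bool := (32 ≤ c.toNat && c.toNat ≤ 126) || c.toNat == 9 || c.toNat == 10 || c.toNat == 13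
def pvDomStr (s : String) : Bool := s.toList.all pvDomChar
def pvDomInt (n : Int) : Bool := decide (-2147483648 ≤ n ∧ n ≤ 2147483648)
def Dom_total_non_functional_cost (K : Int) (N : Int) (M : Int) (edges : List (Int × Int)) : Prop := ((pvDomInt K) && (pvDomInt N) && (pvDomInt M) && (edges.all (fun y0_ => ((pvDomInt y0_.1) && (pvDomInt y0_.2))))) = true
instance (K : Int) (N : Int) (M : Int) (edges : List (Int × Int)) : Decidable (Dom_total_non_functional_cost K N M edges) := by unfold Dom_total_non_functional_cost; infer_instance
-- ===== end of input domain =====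

-- B replaces A's adjacency-list + BFS-queue traversal by whole-frontier set
-- saturation over the edge list (alternative algorithm, similar cost).

-- ===== PORT A =====
-- graph = defaultdict(list); for u, v in edges: graph[u].append(v); graph[v].append(u)
def pvBuildGraph (edges : List (Int × Int)) : PySem.Dict Int (List Int) :=
  edges.foldl
    (fun g p => (g.modify p.1 [] (· ++ [p.2])).modify p.2 [] (· ++ [p.1]))
    PySem.Dict.empty

-- for neighbor in graph[node]: if neighbor not in visited: visited.add; queue.append
def pvBfsInner (visited : PySem.Set Int) (queue : List Int) (ns : List Int) :
    PySem.Set Int × List Int :=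
  ns.foldl
    (fun vq n => if vq.1.contains n then vq else (PySem.Set.add vq.1 n, vq.2 ++ [n]))
    (visited, queue)

-- while queue: … (fuel 2*len(edges)+1 bounds the number of pops, proved below)
def pvBfsLoop (M : Int) (g : PySem.Dict Int (List Int)) (fuel : Nat)
    (visited : PySem.Set Int) (queue : List Int) (cnt : Int) : Int :=
  match queue, fuel with
  | [], _ => cnt
  | _ :: _, 0 => cnt
  | node :: rest, f + 1 =>
    let cnt' := if node != 0 && PySem.Int.mod node M == 0 then cnt + 1 else cnt
    let vq := pvBfsInner visited rest (g.getD node [])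
    pvBfsLoop M g f vq.1 vq.2 cnt'

def total_non_functional_cost (K : Int) (N : Int) (M : Int) (edges : List (Int × Int)) : Int :=
  if M == 0 then 0
  else
    let graph := pvBuildGraph edges
    pvBfsLoop M graph (2 * edges.length + 1) (PySem.Set.ofList [0]) [0] 0 * K

-- ===== PORT B =====
-- {w for u, v in edges if u in comp or v in comp for w in (u, v) if w not in comp}
def pvFrontier (edges : List (Int × Int)) (comp : PySem.Set Int) : PySem.Set Int :=
  edges.foldl
    (fun fr p =>
      if comp.contains p.1 || comp.contains p.2 then
        [p.1, p.2].foldl (fun fr w => if comp.contains w then fr else PySem.Set.add fr w) fr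
      else fr)
    PySem.Set.empty

-- for _ in range(2*len(edges)): frontier = …; if not frontier: break; comp |= frontier
def pvSaturate (edges : List (Int × Int)) (fuel : Nat) (comp : PySem.Set Int) : PySem.Set Int :=
  match fuel with
  | 0 => comp
  | f + 1 =>
    let fr := pvFrontier edges comp
    if fr.isEmpty then comp else pvSaturate edges f (PySem.Set.union comp fr)

def total_non_functional_cost_alt (K : Int) (N : Int) (M : Int) (edges : List (Int × Int)) : Int :=
  if M == 0 then 0
  else
    let comp := pvSaturate edges (2 * edges.length) (PySem.Set.ofList [0])
    comp.foldl (fun a x => if x != 0 && PySem.Int.mod x M == 0 then a + 1 else a) 0 * K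

-- ===== PRECONDITION & SPEC =====
def Spec_total_non_functional_cost (K : Int) (N : Int) (M : Int) (edges : List (Int × Int)) (out : Int) : Prop := out = total_non_functional_cost_alt K N M edges
instance (K : Int) (N : Int) (M : Int) (edges : List (Int × Int)) (out : Int) : Decidable (Spec_total_non_functional_cost K N M edges out) := by unfold Spec_total_non_functional_cost; infer_instance

-- ===== CLAIM (what is proved, stated in full; the proofs are below) =====
def Claim_equal_total_non_functional_cost : Prop := ∀ (K : Int) (N : Int) (M : Int) (edges : List (Int × Int)), Dom_total_non_functional_cost K N M edges → Spec_total_non_functional_cost K N M edges (total_non_functional_cost K N M edges)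

-- ===== LEMMAS AND PROOFS =====


-- the Boolean "non-functional" predicate both programs test
def pvPred (M x : Int) : Bool := x != 0 && PySem.Int.mod x M == 0

-- all node labels that can ever be visited: 0 and every edge endpoint
def pvUniv (edges : List (Int × Int)) : List Int :=
  0 :: edges.flatMap (fun p => [p.1, p.2])

-- a list of nodes closed under the (undirected) edges
def pvClosed (edges : List (Int × Int)) (S : List Int) : Prop :=
  ∀ p ∈ edges, (p.1 ∈ S → p.2 ∈ S) ∧ (p.2 ∈ S → p.1 ∈ S)

-- membership in the conditional Set.add step of pvFrontier's inner fold
lemma pv_mem_condAdd (s comp : PySem.Set Int) (w x : Int) :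
    x ∈ (if comp.contains w then s else PySem.Set.add s w) ↔ x ∈ s ∨ (x = w ∧ w ∉ comp) := by
  by_cases h : w ∈ comp
  · have hc : comp.contains w = true := (PySem.Set.contains_iff _ _).2 h
    simp [h]
  · have hc : comp.contains w = false := by
      cases hcb : comp.contains w with
      | false => rfl
      | true => exact absurd ((PySem.Set.contains_iff _ _).1 hcb) h
    simp [PySem.Set.mem_add, h]

lemma pv_nodup_condAdd (s comp : PySem.Set Int) (w : Int) (hs : s.Nodup) :
    (if comp.contains w then s else PySem.Set.add s w).Nodup := by
  split
  · exact hs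
  · exact PySem.Set.nodup_add _ _ hs

-- membership characterisation of the frontier fold, generalized accumulator
lemma pv_mem_frontier_aux (edges : List (Int × Int)) (comp acc : PySem.Set Int) (x : Int) :
    x ∈ edges.foldl
      (fun fr p =>
        if comp.contains p.1 || comp.contains p.2 then
          [p.1, p.2].foldl (fun fr w => if comp.contains w then fr else PySem.Set.add fr w) fr
        else fr) acc
    ↔ x ∈ acc ∨ (x ∉ comp ∧ ∃ p ∈ edges, (p.1 ∈ comp ∨ p.2 ∈ comp) ∧ (x = p.1 ∨ x = p.2)) := by
  induction edges generalizing acc with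
  | nil => simp
  | cons p es ih =>
    rw [List.foldl_cons, ih]
    by_cases hc : p.1 ∈ comp ∨ p.2 ∈ comp
    · have hcb : (comp.contains p.1 || comp.contains p.2) = true := by
        simp only [Bool.or_eq_true, PySem.Set.contains_iff]
        exact hc
      rw [if_pos hcb, List.foldl_cons, List.foldl_cons, List.foldl_nil]
      simp only [pv_mem_condAdd]
      constructor
      · rintro (((h | ⟨rfl, hn⟩) | ⟨rfl, hn⟩) | ⟨hn, q, hq, hcq, hx⟩)
        · exact Or.inl h
        · exact Or.inr ⟨hn, p, List.mem_cons_self, hc, Or.inl rfl⟩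
        · exact Or.inr ⟨hn, p, List.mem_cons_self, hc, Or.inr rfl⟩
        · exact Or.inr ⟨hn, q, List.mem_cons_of_mem _ hq, hcq, hx⟩
      · rintro (h | ⟨hn, q, hq, hcq, hx⟩)
        · exact Or.inl (Or.inl (Or.inl h))
        · rcases List.mem_cons.1 hq with hq | hq
          · subst hq
            rcases hx with hx | hx
            · exact Or.inl (Or.inl (Or.inr ⟨hx, hx ▸ hn⟩))
            · exact Or.inl (Or.inr ⟨hx, hx ▸ hn⟩)
          · exact Or.inr ⟨hn, q, hq, hcq, hx⟩
    · have hcb : (comp.contains p.1 || comp.contains p.2) = false := by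
        rw [not_or] at hc
        have h1 : comp.contains p.1 = false := by
          cases h : comp.contains p.1 with
          | false => rfl
          | true => exact absurd ((PySem.Set.contains_iff _ _).1 h) hc.1
        have h2 : comp.contains p.2 = false := by
          cases h : comp.contains p.2 with
          | false => rfl
          | true => exact absurd ((PySem.Set.contains_iff _ _).1 h) hc.2
        rw [h1, h2]; rfl
      rw [if_neg (by intro hht; rw [hcb] at hht; cases hht)]
      constructor
      · rintro (h | ⟨hn, q, hq, hcq, hx⟩)
        · exact Or.inl h
        · exact Or.inr ⟨hn, q, List.mem_cons_of_mem _ hq, hcq, hx⟩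
      · rintro (h | ⟨hn, q, hq, hcq, hx⟩)
        · exact Or.inl h
        · rcases List.mem_cons.1 hq with hq | hq
          · subst hq; exact absurd hcq hc
          · exact Or.inr ⟨hn, q, hq, hcq, hx⟩

lemma pv_mem_pvFrontier (edges : List (Int × Int)) (comp : PySem.Set Int) (x : Int) :
    x ∈ pvFrontier edges comp
    ↔ x ∉ comp ∧ ∃ p ∈ edges, (p.1 ∈ comp ∨ p.2 ∈ comp) ∧ (x = p.1 ∨ x = p.2) := by
  have := pv_mem_frontier_aux edges comp PySem.Set.empty x
  simpa [pvFrontier, PySem.Set.empty] using this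

lemma pv_nodup_pvFrontier (edges : List (Int × Int)) (comp : PySem.Set Int) :
    (pvFrontier edges comp).Nodup := by
  have aux : ∀ (es : List (Int × Int)) (acc : PySem.Set Int), acc.Nodup →
      (es.foldl
        (fun fr p =>
          if comp.contains p.1 || comp.contains p.2 then
            [p.1, p.2].foldl (fun fr w => if comp.contains w then fr else PySem.Set.add fr w) fr
          else fr) acc).Nodup := by
    intro es
    induction es with
    | nil => intro acc h; exact h
    | cons p t ih =>
      intro acc h
      simp only [List.foldl_cons]
      apply ih
      split
      · simp only [List.foldl_nil]
        exact pv_nodup_condAdd _ _ _ (pv_nodup_condAdd _ _ _ h)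
      · exact h
  exact aux edges PySem.Set.empty (by simp [PySem.Set.empty])

-- the frontier of a closed-up component is empty ⇒ closedness
lemma pv_closed_of_frontier_empty (edges : List (Int × Int)) (comp : PySem.Set Int)
    (h : pvFrontier edges comp = []) : pvClosed edges comp := by
  intro p hp
  constructor
  · intro h1
    by_contra h2
    have : p.2 ∈ pvFrontier edges comp :=
      (pv_mem_pvFrontier edges comp p.2).2 ⟨h2, p, hp, Or.inl h1, Or.inr rfl⟩
    simp [h] at this
  · intro h1
    by_contra h2
    have : p.1 ∈ pvFrontier edges comp :=
      (pv_mem_pvFrontier edges comp p.1).2 ⟨h2, p, hp, Or.inr h1, Or.inl rfl⟩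
    simp [h] at this

-- disjoint union of sets is append
lemma pv_union_eq_append (s t : PySem.Set Int) (ht : t.Nodup) (hd : ∀ x ∈ t, x ∉ s) :
    PySem.Set.union s t = s ++ t := by
  induction t generalizing s with
  | nil => simp [PySem.Set.union, PySem.Set.update]
  | cons a t ih =>
    have ha : a ∉ s := hd a (by simp)
    have h1 : PySem.Set.union s (a :: t) = PySem.Set.union (s ++ [a]) t := by
      simp [PySem.Set.union, PySem.Set.update, PySem.Set.add_of_not_mem ha]
    rw [h1, ih _ (List.Nodup.of_cons ht)
      (fun x hx => by
        have hxa : x ≠ a := by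
          rintro rfl; exact (List.nodup_cons.1 ht).1 hx
        have := hd x (List.mem_cons_of_mem _ hx)
        simp [hxa, this])]
    simp


-- saturation only grows the component
lemma pv_sat_grows (edges : List (Int × Int)) (f : Nat) (comp : PySem.Set Int) :
    ∀ x ∈ comp, x ∈ pvSaturate edges f comp := by
  induction f generalizing comp with
  | zero => simp [pvSaturate]
  | succ f ih =>
    intro x hx
    rw [pvSaturate]
    split
    · exact hx
    · exact ih _ x ((PySem.Set.mem_union _ _ _).2 (Or.inl hx))

-- saturation stays inside any closed superset
lemma pv_sat_min (edges : List (Int × Int)) (S : List Int) (hS : pvClosed edges S) :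
    ∀ (f : Nat) (comp : PySem.Set Int), (∀ x ∈ comp, x ∈ S) →
      ∀ x ∈ pvSaturate edges f comp, x ∈ S := by
  intro f
  induction f with
  | zero => intro comp h x hx; exact h x hx
  | succ f ih =>
    intro comp h x hx
    rw [pvSaturate] at hx
    split at hx
    · exact h x hx
    · refine ih _ ?_ x hx
      intro y hy
      rcases (PySem.Set.mem_union _ _ _).1 hy with hy | hy
      · exact h y hy
      · rcases (pv_mem_pvFrontier edges comp y).1 hy with ⟨hn, q, hq, hcq, hx2⟩
        have hqS : q.1 ∈ S ∨ q.2 ∈ S := by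
          rcases hcq with hcq | hcq
          · exact Or.inl (h _ hcq)
          · exact Or.inr (h _ hcq)
        have hboth : q.1 ∈ S ∧ q.2 ∈ S := by
          rcases hqS with hs | hs
          · exact ⟨hs, (hS q hq).1 hs⟩
          · exact ⟨(hS q hq).2 hs, hs⟩
        rcases hx2 with rfl | rfl
        · exact hboth.1
        · exact hboth.2

lemma pv_sat_nodup (edges : List (Int × Int)) (f : Nat) (comp : PySem.Set Int)
    (h : comp.Nodup) : (pvSaturate edges f comp).Nodup := by
  induction f generalizing comp with
  | zero => simpa [pvSaturate] using h
  | succ f ih =>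
    rw [pvSaturate]
    split
    · exact h
    · exact ih _ (PySem.Set.nodup_union _ _ h)

-- with enough fuel the saturation reaches a closed set (pigeonhole on pvUniv)
lemma pv_sat_closed (edges : List (Int × Int)) :
    ∀ (f : Nat) (comp : PySem.Set Int), comp.Nodup → (∀ x ∈ comp, x ∈ pvUniv edges) →
      (pvUniv edges).dedup.length ≤ f + comp.length →
      pvClosed edges (pvSaturate edges f comp) := by
  intro f
  induction f with
  | zero =>
    intro comp hnd hsub hlen
    rw [pvSaturate]
    have hsp : comp.Subperm (pvUniv edges).dedup :=
      List.subperm_of_subset hnd (fun x hx => List.mem_dedup.2 (hsub x hx))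
    have hperm : comp.Perm (pvUniv edges).dedup :=
      hsp.perm_of_length_le (by simpa using hlen)
    have huniv : ∀ x ∈ pvUniv edges, x ∈ comp := by
      intro x hx
      exact hperm.symm.mem_iff.1 (List.mem_dedup.2 hx)
    intro p hp
    exact ⟨fun _ => huniv _ (List.mem_cons_of_mem _ (List.mem_flatMap.2 ⟨p, hp, by simp⟩)),
           fun _ => huniv _ (List.mem_cons_of_mem _ (List.mem_flatMap.2 ⟨p, hp, by simp⟩))⟩
  | succ f ih =>
    intro comp hnd hsub hlen
    rw [pvSaturate]
    split
    · next hemp =>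
      exact pv_closed_of_frontier_empty edges comp (List.isEmpty_iff.1 hemp)
    · next hemp =>
      have hfr_nd := pv_nodup_pvFrontier edges comp
      have hfr_dis : ∀ x ∈ pvFrontier edges comp, x ∉ comp :=
        fun x hx => ((pv_mem_pvFrontier edges comp x).1 hx).1
      have hunion : PySem.Set.union comp (pvFrontier edges comp)
          = comp ++ pvFrontier edges comp := pv_union_eq_append _ _ hfr_nd hfr_dis
      have hfr_ne : pvFrontier edges comp ≠ [] := by
        intro h; exact hemp (by simp [h])
      have hfr_len : 1 ≤ (pvFrontier edges comp).length :=
        Nat.one_le_iff_ne_zero.2 (fun h => hfr_ne (List.eq_nil_of_length_eq_zero h))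
      apply ih
      · rw [hunion]
        apply List.Nodup.append hnd hfr_nd
        intro x hx hx2
        exact hfr_dis x hx2 hx
      · rw [hunion]
        intro x hx
        rcases List.mem_append.1 hx with hx | hx
        · exact hsub x hx
        · rcases (pv_mem_pvFrontier edges comp x).1 hx with ⟨_, q, hq, _, hx2⟩
          rcases hx2 with rfl | rfl
          · exact List.mem_cons_of_mem _ (List.mem_flatMap.2 ⟨q, hq, by simp⟩)
          · exact List.mem_cons_of_mem _ (List.mem_flatMap.2 ⟨q, hq, by simp⟩)
      · rw [hunion, List.length_append]
        omega

-- pvUniv itself is closed and contains 0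
lemma pv_univ_closed (edges : List (Int × Int)) : pvClosed edges (pvUniv edges) := by
  intro p hp
  exact ⟨fun _ => List.mem_cons_of_mem _ (List.mem_flatMap.2 ⟨p, hp, by simp⟩),
         fun _ => List.mem_cons_of_mem _ (List.mem_flatMap.2 ⟨p, hp, by simp⟩)⟩

-- adjacency list built by A: membership = being an edge partner
lemma pv_mem_graph (edges : List (Int × Int)) : ∀ (x y : Int),
    y ∈ (pvBuildGraph edges).getD x [] ↔ ((x, y) ∈ edges ∨ (y, x) ∈ edges) := by
  induction edges using List.reverseRecOn with
  | nil => intro x y; simp [pvBuildGraph, PySem.Dict.getD_empty]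
  | append_singleton es p ih =>
    intro x y
    obtain ⟨a, b⟩ := p
    have hstep : pvBuildGraph (es ++ [(a, b)])
        = ((pvBuildGraph es).modify a [] (· ++ [b])).modify b [] (· ++ [a]) := by
      simp [pvBuildGraph, List.foldl_append]
    rw [hstep]
    simp only [PySem.Dict.getD_modify]
    by_cases hab : a = b
    · subst hab
      by_cases h1 : x = a <;> simp [h1, ih, Prod.ext_iff] <;> try tauto
    · have hba : ¬ b = a := fun h => hab h.symm
      by_cases h2 : x = b
      · subst h2
        simp [hba, hab, ih, Prod.ext_iff]
        try tauto
      · by_cases h1 : x = a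
        · subst h1
          simp [hba, hab, h2, ih, Prod.ext_iff]
          try tauto
        · simp [h1, h2, ih, Prod.ext_iff]
          try tauto

-- the nodes newly discovered by one BFS inner loop
def pvNew (visited ns : List Int) : List Int :=
  match ns with
  | [] => []
  | n :: t => if n ∈ visited then pvNew visited t else n :: pvNew (visited ++ [n]) t

lemma pv_bfsInner_eq (ns : List Int) : ∀ (visited : PySem.Set Int) (queue : List Int),
    pvBfsInner visited queue ns = (visited ++ pvNew visited ns, queue ++ pvNew visited ns) := by
  induction ns with
  | nil => intro visited queue; simp [pvBfsInner, pvNew]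
  | cons n t ih =>
    intro visited queue
    rw [pvBfsInner, List.foldl_cons]
    by_cases h : n ∈ visited
    · rw [pvNew, if_pos h]
      have := ih visited queue
      rw [pvBfsInner] at this
      simpa [h] using this
    · have hc : visited.contains n = false := by
        cases hcb : visited.contains n with
        | false => rfl
        | true => exact absurd ((PySem.Set.contains_iff _ _).1 hcb) h
      rw [pvNew, if_neg h]
      have := ih (PySem.Set.add visited n) (queue ++ [n])
      rw [pvBfsInner] at this
      rw [PySem.Set.add_of_not_mem h] at this
      simpa [h] using this

lemma pv_pvNew_mem (ns : List Int) : ∀ (v : List Int) (x : Int),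
    x ∈ pvNew v ns → x ∈ ns ∧ x ∉ v := by
  induction ns with
  | nil => intro v x hx; simp [pvNew] at hx
  | cons n t ih =>
    intro v x hx
    rw [pvNew] at hx
    split at hx
    · have := ih v x hx
      exact ⟨List.mem_cons_of_mem _ this.1, this.2⟩
    · rcases List.mem_cons.1 hx with rfl | hx
      · next hnv => exact ⟨List.mem_cons_self, hnv⟩
      · have := ih (v ++ [n]) x hx
        exact ⟨List.mem_cons_of_mem _ this.1, fun hv => this.2 (List.mem_append_left _ hv)⟩

lemma pv_pvNew_cover (ns : List Int) : ∀ (v : List Int) (x : Int),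
    x ∈ ns → x ∈ v ∨ x ∈ pvNew v ns := by
  induction ns with
  | nil => intro v x hx; simp at hx
  | cons n t ih =>
    intro v x hx
    rw [pvNew]
    rcases List.mem_cons.1 hx with rfl | hx
    · by_cases h : x ∈ v
      · exact Or.inl h
      · rw [if_neg h]; exact Or.inr List.mem_cons_self
    · by_cases h : n ∈ v
      · rw [if_pos h]; exact ih v x hx
      · rw [if_neg h]
        rcases ih (v ++ [n]) x hx with hv | hnew
        · rcases List.mem_append.1 hv with hv | hv
          · exact Or.inl hv
          · simp at hv; subst hv; exact Or.inr List.mem_cons_self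
        · exact Or.inr (List.mem_cons_of_mem _ hnew)

lemma pv_pvNew_nodup (ns : List Int) : ∀ (v : List Int), (pvNew v ns).Nodup := by
  induction ns with
  | nil => intro v; simp [pvNew]
  | cons n t ih =>
    intro v
    rw [pvNew]
    split
    · exact ih v
    · refine List.nodup_cons.2 ⟨?_, ih (v ++ [n])⟩
      intro hmem
      exact (pv_pvNew_mem t (v ++ [n]) n hmem).2 (List.mem_append_right _ List.mem_cons_self)

-- peeling the newly visited nodes off the unvisited remainder of C
lemma pv_filter_perm (C v new : List Int) (hC : C.Nodup) (hnew : new.Nodup)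
    (hsub : ∀ x ∈ new, x ∈ C ∧ x ∉ v) :
    (C.filter (fun c => decide (c ∉ v))).Perm
      (new ++ C.filter (fun c => decide (c ∉ v ++ new))) := by
  rw [List.perm_ext_iff_of_nodup (hC.filter _)
    (List.Nodup.append hnew (hC.filter _)
      (fun x hx hx2 => by
        have := (List.mem_filter.1 hx2).2
        simp only [decide_eq_true_eq, List.mem_append, not_or] at this
        exact this.2 hx))]
  intro a
  simp only [List.mem_filter, decide_eq_true_eq, List.mem_append, not_or]
  constructor
  · rintro ⟨haC, hav⟩
    by_cases han : a ∈ new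
    · exact Or.inl han
    · exact Or.inr ⟨haC, hav, han⟩
  · rintro (han | ⟨haC, hav, han⟩)
    · exact ⟨(hsub a han).1, (hsub a han).2⟩
    · exact ⟨haC, hav⟩

-- THE BFS INVARIANT: the loop returns cnt + (pred-count of queue) + (pred-count of C not yet visited)
lemma pv_bfs_count (M : Int) (edges : List (Int × Int)) (C : List Int)
    (hCnd : C.Nodup) (hCcl : pvClosed edges C)
    (hCmin : ∀ S, (0:Int) ∈ S → pvClosed edges S → ∀ x ∈ C, x ∈ S) :
    ∀ (fuel : Nat) (visited : PySem.Set Int) (queue : List Int) (cnt : Int),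
      visited.Nodup → queue.Nodup → (∀ x ∈ queue, x ∈ visited) →
      (∀ x ∈ visited, x ∈ C) → (0:Int) ∈ visited →
      (∀ x ∈ visited, x ∉ queue → ∀ y ∈ (pvBuildGraph edges).getD x [], y ∈ visited) →
      queue.length + (C.filter (fun c => decide (c ∉ visited))).length ≤ fuel →
      pvBfsLoop M (pvBuildGraph edges) fuel visited queue cnt
        = cnt + (queue.countP (pvPred M) : Int)
            + ((C.filter (fun c => decide (c ∉ visited))).countP (pvPred M) : Int) := by
  intro fuel
  induction fuel with
  | zero =>
    intro visited queue cnt hvnd hqnd hqv hvC h0v hproc hfuel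
    cases queue with
    | nil =>
      have hcl : pvClosed edges visited := by
        intro p hp
        exact ⟨fun h1 => hproc p.1 h1 (by simp) p.2 ((pv_mem_graph edges p.1 p.2).2 (Or.inl hp)),
               fun h1 => hproc p.2 h1 (by simp) p.1 ((pv_mem_graph edges p.2 p.1).2 (Or.inr hp))⟩
      have hCv : ∀ x ∈ C, x ∈ visited := hCmin visited h0v hcl
      simp [pvBfsLoop]
      exact fun a ha hav => absurd (hCv a ha) hav

    | cons node rest => simp at hfuel
  | succ f ih =>
    intro visited queue cnt hvnd hqnd hqv hvC h0v hproc hfuel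
    cases queue with
    | nil =>
      have hcl : pvClosed edges visited := by
        intro p hp
        exact ⟨fun h1 => hproc p.1 h1 (by simp) p.2 ((pv_mem_graph edges p.1 p.2).2 (Or.inl hp)),
               fun h1 => hproc p.2 h1 (by simp) p.1 ((pv_mem_graph edges p.2 p.1).2 (Or.inr hp))⟩
      have hCv : ∀ x ∈ C, x ∈ visited := hCmin visited h0v hcl
      simp [pvBfsLoop]
      exact fun a ha hav => absurd (hCv a ha) hav

    | cons node rest =>
      have hloop : pvBfsLoop M (pvBuildGraph edges) (f + 1) visited (node :: rest) cnt
          = pvBfsLoop M (pvBuildGraph edges) f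
              (visited ++ pvNew visited ((pvBuildGraph edges).getD node []))
              (rest ++ pvNew visited ((pvBuildGraph edges).getD node []))
              (if pvPred M node then cnt + 1 else cnt) := by
        simp only [pvBfsLoop]
        rw [pv_bfsInner_eq]
        rfl
      set ns := (pvBuildGraph edges).getD node [] with hns
      set new := pvNew visited ns with hnewdef
      have hnodeV : node ∈ visited := hqv node List.mem_cons_self
      have hnodeC : node ∈ C := hvC node hnodeV
      have hnew_mem : ∀ x ∈ new, x ∈ ns ∧ x ∉ visited := fun x hx => pv_pvNew_mem ns visited x hx
      have hnewC : ∀ x ∈ new, x ∈ C := by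
        intro x hx
        rcases (pv_mem_graph edges node x).1 (hnew_mem x hx).1 with he | he
        · exact (hCcl _ he).1 hnodeC
        · exact (hCcl _ he).2 hnodeC
      have hnew_nd : new.Nodup := pv_pvNew_nodup ns visited
      have hsubnew : ∀ x ∈ new, x ∈ C ∧ x ∉ visited :=
        fun x hx => ⟨hnewC x hx, (hnew_mem x hx).2⟩
      have hperm := pv_filter_perm C visited new hCnd hnew_nd hsubnew
      have hcnt : (C.filter (fun c => decide (c ∉ visited))).countP (pvPred M)
          = new.countP (pvPred M)
            + (C.filter (fun c => decide (c ∉ visited ++ new))).countP (pvPred M) := by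
        rw [hperm.countP_eq]
        simp [List.countP_append]
      have hlen : (C.filter (fun c => decide (c ∉ visited))).length
          = new.length + (C.filter (fun c => decide (c ∉ visited ++ new))).length := by
        rw [hperm.length_eq]
        simp
      rw [hloop, ih (visited ++ new) (rest ++ new) _
        (by
          apply List.Nodup.append hvnd hnew_nd
          intro x hx hx2
          exact (hnew_mem x hx2).2 hx)
        (by
          apply List.Nodup.append (List.Nodup.of_cons hqnd) hnew_nd
          intro x hx hx2
          exact (hnew_mem x hx2).2 (hqv x (List.mem_cons_of_mem _ hx)))
        (by
          intro x hx
          rcases List.mem_append.1 hx with hx | hx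
          · exact List.mem_append_left _ (hqv x (List.mem_cons_of_mem _ hx))
          · exact List.mem_append_right _ hx)
        (by
          intro x hx
          rcases List.mem_append.1 hx with hx | hx
          · exact hvC x hx
          · exact hnewC x hx)
        (List.mem_append_left _ h0v)
        (by
          intro x hx hxq y hy
          rcases List.mem_append.1 hx with hx | hx
          · by_cases hxn : x = node
            · subst hxn
              rcases pv_pvNew_cover ns visited y hy with h | h
              · exact List.mem_append_left _ h
              · exact List.mem_append_right _ h
            · have hxq2 : x ∉ node :: rest := by
                intro hmem
                rcases List.mem_cons.1 hmem with h | h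
                · exact hxn h
                · exact hxq (List.mem_append_left _ h)
              exact List.mem_append_left _ (hproc x hx hxq2 y hy)
          · exact absurd (List.mem_append_right _ hx) hxq)
        (by
          simp only [List.length_append]
          simp only [List.length_cons] at hfuel
          omega)]
      simp only [List.countP_cons, List.countP_append, hcnt]
      cases hp : pvPred M node <;> simp [hp] <;> omega

lemma pv_univ_len (edges : List (Int × Int)) :
    (pvUniv edges).length = 2 * edges.length + 1 := by
  induction edges with
  | nil => rfl
  | cons p es ih =>
    simp [pvUniv] at ih ⊢
    omega

-- specialisation of the BFS invariant to the initial state and of B to countP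
lemma pv_main (M : Int) (edges : List (Int × Int)) :
    pvBfsLoop M (pvBuildGraph edges) (2 * edges.length + 1) (PySem.Set.ofList [0]) [0] 0
      = ((pvSaturate edges (2 * edges.length) (PySem.Set.ofList [0])).countP (pvPred M) : Int) := by
  have h00 : PySem.Set.ofList [(0 : Int)] = [0] := rfl
  set C := pvSaturate edges (2 * edges.length) (PySem.Set.ofList [0]) with hCdef
  have hCnd : C.Nodup := pv_sat_nodup _ _ _ (by rw [h00]; simp)
  have hC0 : (0 : Int) ∈ C := pv_sat_grows _ _ _ 0 (by rw [h00]; simp)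
  have hCcl : pvClosed edges C := by
    apply pv_sat_closed edges _ _ (by rw [h00]; simp)
    · rw [h00]
      intro x hx
      simp at hx
      subst hx
      exact List.mem_cons_self
    · have hd : (pvUniv edges).dedup.length ≤ (pvUniv edges).length :=
        (List.dedup_sublist _).length_le
      rw [h00, pv_univ_len] at *
      simp only [List.length_cons, List.length_nil]
      omega
  have hCmin : ∀ S, (0:Int) ∈ S → pvClosed edges S → ∀ x ∈ C, x ∈ S := by
    intro S h0S hS
    apply pv_sat_min edges S hS
    rw [h00]
    intro x hx
    simp at hx
    subst hx
    exact h0S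
  have hCuniv : ∀ x ∈ C, x ∈ pvUniv edges :=
    hCmin _ List.mem_cons_self (pv_univ_closed edges)
  have hClen : C.length ≤ 2 * edges.length + 1 := by
    have := (List.subperm_of_subset hCnd hCuniv).length_le
    rwa [pv_univ_len] at this
  have hp0 : pvPred M 0 = false := rfl
  have hperm0 := pv_filter_perm C [] [0] hCnd (by simp) (by
    intro x hx
    simp at hx
    subst hx
    exact ⟨hC0, by simp⟩)
  have hfilter_true : C.filter (fun c => decide (c ∉ ([] : List Int))) = C := by
    simp
  rw [hfilter_true] at hperm0
  have hnilapp : (([] : List Int) ++ [0]) = [0] := rfl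
  rw [hnilapp] at hperm0
  have hlen0 : C.length = 1 + (C.filter (fun c => decide (c ∉ ([0] : List Int)))).length := by
    rw [hperm0.length_eq, List.length_append]
    rfl
  have hcnt0 : C.countP (pvPred M)
      = (C.filter (fun c => decide (c ∉ ([0] : List Int)))).countP (pvPred M) := by
    have := hperm0.countP_eq (pvPred M)
    simpa [hp0] using this
  rw [h00]
  rw [pv_bfs_count M edges C hCnd hCcl hCmin (2 * edges.length + 1) [0] [0] 0
    (by simp) (by simp)
    (fun x hx => hx)
    (by
      intro x hx
      simp at hx
      subst hx
      exact hC0)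
    List.mem_cons_self
    (by
      intro x hx hxq
      exact absurd hx hxq)
    (by
      simp only [List.length_cons, List.length_nil]
      omega)]
  rw [← hcnt0]
  simp [hp0]

-- ===== VERDICT (by name: the statement is the Claim_ definition above) =====
theorem total_non_functional_cost_spec : Claim_equal_total_non_functional_cost := by
  unfold Claim_equal_total_non_functional_cost
  intro K N M edges _hdom
  unfold Spec_total_non_functional_cost
  unfold total_non_functional_cost total_non_functional_cost_alt
  by_cases hM : (M == 0) = true
  · rw [if_pos hM, if_pos hM]
  · rw [if_neg hM, if_neg hM]
    show pvBfsLoop M (pvBuildGraph edges) (2 * edges.length + 1) (PySem.Set.ofList [0]) [0] 0 * K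
      = (pvSaturate edges (2 * edges.length) (PySem.Set.ofList [0])).foldl
          (fun a x => if x != 0 && PySem.Int.mod x M == 0 then a + 1 else a) 0 * K
    rw [PySem.List.foldl_count_if (fun x => x != 0 && PySem.Int.mod x M == 0)]
    rw [pv_main M edges]
    rw [zero_add]
    rfl
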